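-- pv_equiv track=rewrite | github.com/AliCW/random-katas | python-venv/delete_nth/kata_function/delete_nth.py | delete_nth
-- ===== SOURCE A (Python) =====
-- def delete_nth(arr, int):
--     output = []
--     dict = {}
--
--     for i in range(len(arr)):
--         if arr[i] in dict:
--             dict[arr[i]] += 1
--         else:
--             dict[arr[i]] = 1
--
--         if dict[arr[i]] > int:
--             continue
--         else:
--             output.append(arr[i])
--
--     return output
-- ===== SOURCE B (Python) =====
-- def delete_nth(arr, int):
--     if int <= 0:
--         return []
--     positions = {}
--     for i, x in enumerate(arr):
--         positions.setdefault(x, []).append(i)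
--     keep = sorted(i for idxs in positions.values() for i in idxs[:int])
--     return [arr[i] for i in keep]
-- ===== Notes on version B (the rewrite author's own statement) =====
-- stated objective: alternative
-- what changed: Instead of a single pass with a running occurrence counter, B groups the indices of each value (positions dict built from enumerate), truncates every group to its first `int` positions, sorts the surviving indices and rebuilds the list from them; a non-positive limit short-circuits to [].
import Mathlib
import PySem

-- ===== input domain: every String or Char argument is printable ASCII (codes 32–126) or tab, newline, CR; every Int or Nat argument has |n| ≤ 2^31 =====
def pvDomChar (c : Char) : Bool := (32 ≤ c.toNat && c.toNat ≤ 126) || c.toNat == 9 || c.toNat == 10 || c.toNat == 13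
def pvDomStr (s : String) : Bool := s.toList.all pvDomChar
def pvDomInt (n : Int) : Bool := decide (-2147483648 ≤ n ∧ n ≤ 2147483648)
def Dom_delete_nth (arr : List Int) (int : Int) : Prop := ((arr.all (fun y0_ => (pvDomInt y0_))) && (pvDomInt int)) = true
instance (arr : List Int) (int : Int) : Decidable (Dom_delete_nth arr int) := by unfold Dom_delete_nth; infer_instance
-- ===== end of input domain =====

-- B replaces A's single counter-dict pass by a group-by: it collects the index positions of each
-- value, keeps the first `int` positions of every group, sorts the kept indices and rebuilds the
-- list from them; objective: alternative. Return values are proved identical on all inputs.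

-- ===== PORT A =====
-- for i in range(len(arr)): maintain (output, dict); append arr[i] unless its count exceeds int
def delete_nth (arr : List Int) (int : Int) : List Int :=
  ((PySem.List.pyRange 0 (PySem.List.len arr) 1).foldl
    (fun (s : List Int × PySem.Dict Int Int) i =>
      let x := PySem.List.pyGetD arr i 0   -- arr[i]; i always in range here
      let d := if PySem.Dict.contains s.2 x
               then PySem.Dict.insert s.2 x (PySem.Dict.getD s.2 x 0 + 1)
               else PySem.Dict.insert s.2 x 1
      if PySem.Dict.getD d x 0 > int then (s.1, d) else (s.1 ++ [x], d))
    ([], PySem.Dict.empty)).1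

-- ===== PORT B =====
-- if int <= 0: return []; positions.setdefault(x, []).append(i) over enumerate(arr);
-- keep = sorted(i for idxs in positions.values() for i in idxs[:int]); [arr[i] for i in keep]
def delete_nth_alt (arr : List Int) (int : Int) : List Int :=
  if int ≤ 0 then []
  else
    let positions := (PySem.List.enumerate arr).foldl
      (fun d p => PySem.Dict.modify d p.2 [] (fun l => l ++ [p.1])) PySem.Dict.empty
    let keep := PySem.List.sorted
      ((PySem.Dict.values positions).flatMap (fun idxs => PySem.List.slice idxs none (some int)))
      (fun x => x) false
    keep.map (fun i => PySem.List.pyGetD arr i 0)   -- arr[i]; every kept i is in range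

-- ===== PRECONDITION & SPEC =====
def Spec_delete_nth (arr : List Int) (int : Int) (out : List Int) : Prop := out = delete_nth_alt arr int
instance (arr : List Int) (int : Int) (out : List Int) : Decidable (Spec_delete_nth arr int out) := by unfold Spec_delete_nth; infer_instance

-- ===== CLAIM (what is proved, stated in full; the proofs are below) =====
def Claim_equal_delete_nth : Prop := ∀ (arr : List Int) (int : Int), Dom_delete_nth arr int → Spec_delete_nth arr int (delete_nth arr int)

-- ===== LEMMAS AND PROOFS =====
-- A's loop body (proof helper; definitionally equal to the lambda inside delete_nth)
def stepA (int : Int) (s : List Int × PySem.Dict Int Int) (x : Int) : List Int × PySem.Dict Int Int :=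
  let d := if PySem.Dict.contains s.2 x
           then PySem.Dict.insert s.2 x (PySem.Dict.getD s.2 x 0 + 1)
           else PySem.Dict.insert s.2 x 1
  if PySem.Dict.getD d x 0 > int then (s.1, d) else (s.1 ++ [x], d)


def stepC (int : Int) (out : List Int) (x : Int) : List Int :=
  if (PySem.List.count out x : Int) < int then out ++ [x] else out
def runC (int : Int) (arr : List Int) : List Int := arr.foldl (stepC int) []
def grp (arr : List Int) (x : Int) : List Int :=
  ((PySem.List.enumerate arr).filter (fun p => p.2 == x)).map (·.1)

theorem runC_nonpos (int : Int) (h : int ≤ 0) (arr : List Int) : runC int arr = [] := by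
  unfold runC
  have : ∀ out, arr.foldl (stepC int) out = out := by
    induction arr with
    | nil => intro out; rfl
    | cons x rest ih =>
      intro out
      simp only [List.foldl_cons, stepC]
      rw [if_neg (by have := PySem.List.count out x; omega)]
      exact ih out
  exact this []

theorem cnt_runC (int : Int) (arr : List Int) (y : Int) :
    ((runC int arr).count y : Int) = min (arr.count y : Int) (max int 0) := by
  induction arr using List.reverseRecOn generalizing y with
  | nil => simp [runC]
  | append_singleton arr x ih =>
    have hx := ih x
    have hy := ih y
    unfold runC at *
    rw [List.foldl_append]
    simp only [List.foldl_cons, List.foldl_nil, stepC]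
    rw [PySem.List.count_eq] at *
    by_cases hxy : x = y <;> split_ifs with h <;>
      simp only [List.count_append, List.count_cons, List.count_nil,
        hxy, if_pos, beq_iff_eq, reduceIte] at * <;>
      push_cast at * <;> omega

theorem length_grp (arr : List Int) (x : Int) : (grp arr x).length = arr.count x := by
  unfold grp
  rw [List.length_map, ← List.countP_eq_length_filter]
  have := PySem.List.map_snd_enumerate arr (0:Int)
  calc ((PySem.List.enumerate arr 0).countP (fun p => p.2 == x))
      = (((PySem.List.enumerate arr 0).map (·.2)).countP (fun v => v == x)) := by
        rw [List.countP_map]; rfl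
    _ = arr.count x := by rw [this]; rfl

def goodI (int : Int) (arr : List Int) : List Int :=
  ((PySem.List.enumerate arr).filter
    (fun p => decide (((arr.take p.1.toNat).count p.2 : Int) < int))).map (·.1)

theorem grp_append (arr : List Int) (y x : Int) :
    grp (arr ++ [y]) x = grp arr x ++ (if x = y then [(arr.length : Int)] else []) := by
  unfold grp
  rw [PySem.List.enumerate_append, List.filter_append, List.map_append]
  congr 1
  by_cases h : x = y
  · subst h
    simp [PySem.List.enumerate_cons, PySem.List.enumerate_nil]
  · simp [PySem.List.enumerate_cons, PySem.List.enumerate_nil,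
      (by simpa [beq_iff_eq] using Ne.symm h : ((y == x)) = false), h]

theorem mem_good (int : Int) (arr : List Int) (i : Int) (h : i ∈ goodI int arr) :
    ∃ (k : Nat), k < arr.length ∧ i = (k : Int) := by
  unfold goodI at h
  obtain ⟨p, hp, rfl⟩ := List.mem_map.mp h
  have hp' := List.mem_filter.mp hp
  obtain ⟨k, hk, rfl⟩ := (PySem.List.mem_enumerate_iff _ _ _).mp hp'.1
  exact ⟨k, hk, by simp⟩

theorem good_snoc (int : Int) (arr : List Int) (y : Int) :
    goodI int (arr ++ [y])
      = goodI int arr ++ (if ((arr.count y : Int) < int) then [(arr.length : Int)] else []) := by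
  unfold goodI
  rw [PySem.List.enumerate_append, List.filter_append, List.map_append]
  congr 1
  · apply congrArg
    apply List.filter_congr
    intro p hp
    obtain ⟨k, hk, rfl⟩ := (PySem.List.mem_enumerate_iff _ _ _).mp hp
    have ht : ((arr ++ [y]).take ((0:Int)+(k:Int)).toNat) = arr.take k := by
      have : ((0:Int)+(k:Int)).toNat = k := by omega
      rw [this, List.take_append_of_le_length (by omega)]
    rw [ht]; simp
  · simp only [PySem.List.enumerate_cons, PySem.List.enumerate_nil]
    have ht : ((arr ++ [y]).take ((0:Int)+(arr.length:Int)).toNat) = arr := by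
      have : ((0:Int)+(arr.length:Int)).toNat = arr.length := by omega
      rw [this, List.take_left]
    simp only [List.filter_cons, List.filter_nil, ht]
    by_cases h : ((arr.count y : Int) < int)
    · simp [h]
    · simp [h]

theorem good_pairwise_lt (int : Int) (arr : List Int) : (goodI int arr).Pairwise (· < ·) := by
  unfold goodI
  rw [List.pairwise_map]
  exact (PySem.List.pairwise_lt_enumerate arr 0).sublist List.filter_sublist

def flatI (int : Int) (arr : List Int) : List Int :=
  (PySem.Set.ofList arr).flatMap (fun x => (grp arr x).take int.toNat)

theorem ofList_append_singleton (arr : List Int) (y : Int) :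
    PySem.Set.ofList (arr ++ [y]) = PySem.Set.add (PySem.Set.ofList arr) y := by
  rw [PySem.Set.ofList_eq_foldl, PySem.Set.ofList_eq_foldl, List.foldl_append]
  rfl

theorem grp_nil_of_not_mem (arr : List Int) (y : Int) (h : y ∉ arr) : grp arr y = [] := by
  have := length_grp arr y
  rw [List.count_eq_zero.mpr h] at this
  exact List.eq_nil_of_length_eq_zero this

theorem flatMap_congr_mem (l : List Int) (f g : Int → List Int)
    (h : ∀ x ∈ l, f x = g x) : l.flatMap f = l.flatMap g := by
  induction l with
  | nil => rfl
  | cons a t ih =>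
    rw [List.flatMap_cons, List.flatMap_cons, h a (by simp), ih (fun x hx => h x (by simp [hx]))]

theorem flat_perm_snoc (int : Int) (hp : 0 < int) (arr : List Int) (y : Int) :
    (flatI int (arr ++ [y])).Perm
      (flatI int arr ++ (if ((arr.count y : Int) < int) then [(arr.length : Int)] else [])) := by
  unfold flatI
  rw [ofList_append_singleton]
  by_cases hy : y ∈ arr
  · -- y already has a group; only that group may gain the new index
    have hyS : y ∈ PySem.Set.ofList arr := (PySem.Set.mem_ofList arr y).mpr hy
    have hadd : PySem.Set.add (PySem.Set.ofList arr) y = PySem.Set.ofList arr := by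
      simp [PySem.Set.add, PySem.Set.contains, hyS]
    rw [hadd]
    obtain ⟨l₁, l₂, hS⟩ := List.append_of_mem hyS
    have hnd : (l₁ ++ y :: l₂).Nodup := hS ▸ PySem.Set.nodup_ofList arr
    have hy12 : ∀ a ∈ l₁ ++ l₂, y ≠ a := (List.pairwise_cons.mp (List.nodup_middle.mp hnd)).1
    have hy1 : y ∉ l₁ := fun hmem => hy12 y (List.mem_append.mpr (Or.inl hmem)) rfl
    have hy2 : y ∉ l₂ := fun hmem => hy12 y (List.mem_append.mpr (Or.inr hmem)) rfl
    rw [hS, List.flatMap_append, List.flatMap_append, List.flatMap_cons, List.flatMap_cons]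
    have h1 : l₁.flatMap (fun x => (grp (arr ++ [y]) x).take int.toNat)
        = l₁.flatMap (fun x => (grp arr x).take int.toNat) := by
      apply flatMap_congr_mem; intro x hx
      rw [grp_append, if_neg (by rintro rfl; exact hy1 hx), List.append_nil]
    have h2 : l₂.flatMap (fun x => (grp (arr ++ [y]) x).take int.toNat)
        = l₂.flatMap (fun x => (grp arr x).take int.toNat) := by
      apply flatMap_congr_mem; intro x hx
      rw [grp_append, if_neg (by rintro rfl; exact hy2 hx), List.append_nil]
    rw [h1, h2, grp_append, if_pos rfl]
    by_cases hc : (arr.count y : Int) < int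
    · have hlen : (grp arr y).length + 1 ≤ int.toNat := by rw [length_grp]; omega
      have h3 : (grp arr y ++ [(arr.length : Int)]).length ≤ int.toNat := by simpa using hlen
      have h4 : (grp arr y).length ≤ int.toNat := by omega
      rw [if_pos hc, List.take_of_length_le h3, List.take_of_length_le h4]
      simp only [List.append_assoc]
      exact List.Perm.append_left _ (List.Perm.append_left _ List.perm_append_comm)
    · have hlen : int.toNat ≤ (grp arr y).length := by rw [length_grp]; omega
      rw [if_neg hc, List.take_append_of_le_length hlen, List.append_nil]
  · -- y is a fresh value: its singleton group [n] is appended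
    have hyS : y ∉ PySem.Set.ofList arr := fun h => hy ((PySem.Set.mem_ofList arr y).mp h)
    have hadd : PySem.Set.add (PySem.Set.ofList arr) y = PySem.Set.ofList arr ++ [y] := by
      simp [PySem.Set.add, PySem.Set.contains, hyS]
    rw [hadd, List.flatMap_append, List.flatMap_cons, List.flatMap_nil, List.append_nil]
    have h1 : (PySem.Set.ofList arr).flatMap (fun x => (grp (arr ++ [y]) x).take int.toNat)
        = (PySem.Set.ofList arr).flatMap (fun x => (grp arr x).take int.toNat) := by
      apply flatMap_congr_mem; intro x hx
      rw [grp_append, if_neg (by rintro rfl; exact hyS hx), List.append_nil]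
    rw [h1, grp_append, if_pos rfl, grp_nil_of_not_mem arr y hy, List.nil_append,
        if_pos (by rw [List.count_eq_zero.mpr hy]; exact_mod_cast hp),
        List.take_of_length_le (by simp; omega)]

theorem flat_perm_good (int : Int) (hp : 0 < int) (arr : List Int) :
    (flatI int arr).Perm (goodI int arr) := by
  induction arr using List.reverseRecOn with
  | nil => rfl
  | append_singleton arr y ih =>
    rw [good_snoc]
    exact (flat_perm_snoc int hp arr y).trans (ih.append_right _)

def posDict (arr : List Int) : PySem.Dict Int (List Int) :=
  (PySem.List.enumerate arr).foldl
    (fun d p => PySem.Dict.modify d p.2 [] (fun l => l ++ [p.1])) PySem.Dict.empty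

theorem getD_posDict (arr : List Int) (x : Int) :
    PySem.Dict.getD (posDict arr) x [] = grp arr x := by
  have h0 : posDict arr
      = ((PySem.List.enumerate arr).map Prod.swap).foldl
          (fun d p => PySem.Dict.modify d p.1 [] (fun l => l ++ [p.2])) PySem.Dict.empty := by
    rw [List.foldl_map]; rfl
  rw [h0, PySem.Dict.getD_foldl_modify_append, PySem.Dict.getD_empty, List.nil_append,
      List.filter_map]
  unfold grp
  rw [List.map_map]
  rfl

theorem keys_posDict (arr : List Int) :
    PySem.Dict.keys (posDict arr) = PySem.Set.ofList arr := by
  unfold posDict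
  rw [PySem.Dict.keys_foldl_modify_key (PySem.List.enumerate arr) (fun p => p.2) []
        (fun _ p => (fun l => l ++ [p.1])) PySem.Dict.empty,
      PySem.Dict.keys_empty, PySem.List.map_snd_enumerate, PySem.Set.ofList_eq_foldl]
  rfl

theorem nodup_keys_posDict (arr : List Int) : (PySem.Dict.keys (posDict arr)).Nodup := by
  rw [keys_posDict]
  exact PySem.Set.nodup_ofList arr

theorem alt_eq (arr : List Int) (int : Int) (hp : 0 < int) :
    delete_nth_alt arr int
      = (PySem.List.sorted (flatI int arr) (fun x => x) false).map
          (fun i => PySem.List.pyGetD arr i 0) := by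
  unfold delete_nth_alt
  rw [if_neg (by omega)]
  show (PySem.List.sorted ((PySem.Dict.values (posDict arr)).flatMap
        (fun idxs => PySem.List.slice idxs none (some int))) (fun x => x) false).map
        (fun i => PySem.List.pyGetD arr i 0) = _
  have hv : PySem.Dict.values (posDict arr) = (PySem.Set.ofList arr).map (grp arr) := by
    rw [PySem.Dict.values_eq_map_keys (posDict arr) (nodup_keys_posDict arr) [],
        keys_posDict]
    exact List.map_congr_left (fun k _ => getD_posDict arr k)
  have hs : ∀ l : List Int, PySem.List.slice l none (some int) = l.take int.toNat := by
    intro l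
    rw [← Int.toNat_of_nonneg (le_of_lt hp), PySem.List.slice_to_natCast]
    simp
    omega
  rw [hv]
  have hf : ((PySem.Set.ofList arr).map (grp arr)).flatMap
      (fun idxs => PySem.List.slice idxs none (some int)) = flatI int arr := by
    rw [List.flatMap_map]
    unfold flatI
    exact flatMap_congr_mem _ _ _ (fun x _ => hs (grp arr x))
  rw [hf]

theorem runC_snoc (int : Int) (arr : List Int) (y : Int) :
    runC int (arr ++ [y]) = stepC int (runC int arr) y := by
  unfold runC
  rw [List.foldl_append]
  rfl

theorem map_good_runC (int : Int) (hp : 0 < int) (arr : List Int) :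
    (goodI int arr).map (fun i => PySem.List.pyGetD arr i 0) = runC int arr := by
  induction arr using List.reverseRecOn with
  | nil => rfl
  | append_singleton arr y ih =>
    rw [good_snoc, List.map_append, runC_snoc, stepC]
    have h1 : (goodI int arr).map (fun i => PySem.List.pyGetD (arr ++ [y]) i 0)
        = (goodI int arr).map (fun i => PySem.List.pyGetD arr i 0) := by
      apply List.map_congr_left
      intro i hi
      obtain ⟨k, hk, rfl⟩ := mem_good int arr i hi
      rw [PySem.List.pyGetD_natCast, PySem.List.pyGetD_natCast,
          List.getD_append _ _ _ _ hk]
    rw [h1, ih]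
    have hcond : ((PySem.List.count (runC int arr) y : Int) < int) ↔ ((arr.count y : Int) < int) := by
      rw [PySem.List.count_eq, cnt_runC]
      omega
    by_cases hc : (arr.count y : Int) < int
    · rw [if_pos hc, if_pos (hcond.mpr hc)]
      congr 1
      simp [PySem.List.pyGetD_natCast]
    · rw [if_neg hc, if_neg (fun h => hc (hcond.mp h))]; simp

-- Loop invariant for A: the dict holds the number of occurrences seen so far, and the output holds
-- min(seen-so-far, max int 0) copies of each value; then A's loop extends output like stepC.
theorem delete_nth_loop_eq (int : Int) (arr : List Int) :
    ∀ (out : List Int) (d : PySem.Dict Int Int),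
      (∀ x, 0 ≤ PySem.Dict.getD d x 0) →
      (∀ x, (List.count x out : Int) = min (PySem.Dict.getD d x 0) (max int 0)) →
      (arr.foldl (stepA int) (out, d)).1 = arr.foldl (stepC int) out := by
  induction arr with
  | nil => intro out d _ _; rfl
  | cons x rest ih =>
    intro out d hnn hcnt
    simp only [List.foldl_cons, stepA, stepC]
    have hx : ∀ (d' : PySem.Dict Int Int),
        (if PySem.Dict.contains d x
         then PySem.Dict.insert d x (PySem.Dict.getD d x 0 + 1)
         else PySem.Dict.insert d x 1) = d' →
        PySem.Dict.getD d' x 0 = PySem.Dict.getD d x 0 + 1 ∧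
        (∀ y, y ≠ x → PySem.Dict.getD d' y 0 = PySem.Dict.getD d y 0) := by
      intro d' hd'
      by_cases hc : PySem.Dict.contains d x
      · subst hd'
        refine ⟨by simp [hc], fun y hy => ?_⟩
        simp [hc, PySem.Dict.getD_insert, hy]
      · have h0 : PySem.Dict.getD d x 0 = 0 :=
          PySem.Dict.getD_of_not_contains d 0 (by simpa using hc)
        subst hd'
        refine ⟨by simp [hc, h0], fun y hy => ?_⟩
        simp [hc, PySem.Dict.getD_insert, hy]
    obtain ⟨hself, hother⟩ := hx _ rfl
    set d' := (if PySem.Dict.contains d x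
               then PySem.Dict.insert d x (PySem.Dict.getD d x 0 + 1)
               else PySem.Dict.insert d x 1) with hd'
    have hc0 : 0 ≤ PySem.Dict.getD d x 0 := hnn x
    have hcx : (List.count x out : Int) = min (PySem.Dict.getD d x 0) (max int 0) := hcnt x
    have hcond : (PySem.Dict.getD d' x 0 > int) ↔ ¬ ((PySem.List.count out x : Int) < int) := by
      rw [hself, PySem.List.count_eq, hcx]; omega
    by_cases hA : PySem.Dict.getD d' x 0 > int
    · -- skip on both sides
      have hB : ¬ ((PySem.List.count out x : Int) < int) := hcond.mp hA
      simp only [if_pos hA, if_neg hB]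
      exact ih out d' (fun y => by
          by_cases hy : y = x
          · subst hy; rw [hself]; omega
          · rw [hother y hy]; exact hnn y)
        (fun y => by
          by_cases hy : y = x
          · subst hy; rw [hself, hcx]; omega
          · rw [hother y hy]; exact hcnt y)
    · -- append on both sides
      have hB : (PySem.List.count out x : Int) < int := by
        by_contra h; exact hA (hcond.mpr h)
      simp only [if_neg hA, if_pos hB]
      refine ih (out ++ [x]) d' (fun y => by
          by_cases hy : y = x
          · subst hy; rw [hself]; omega
          · rw [hother y hy]; exact hnn y)
        (fun y => ?_)
      by_cases hy : y = x
      · subst hy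
        have : List.count y (out ++ [y]) = List.count y out + 1 := by
          simp [List.count_append]
        rw [this, hself]
        have hB' : (List.count y out : Int) < int := by
          rwa [PySem.List.count_eq] at hB
        push_cast
        rw [hcnt y] at hB' ⊢
        omega
      · have : List.count y (out ++ [x]) = List.count y out := by
          simp [List.count_append, List.count_singleton]
          omega
        rw [this, hother y (by exact hy)]
        exact hcnt y

theorem A_eq_runC (arr : List Int) (int : Int) : delete_nth arr int = runC int arr := by
  unfold delete_nth runC
  show (List.foldl (fun acc j => stepA int acc (PySem.List.pyGetD arr j 0))
          ([], PySem.Dict.empty) (PySem.List.pyRange 0 (PySem.List.len arr))).1 = _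
  rw [PySem.List.foldl_pyRange_zero_pyGetD arr 0 (stepA int) ([], PySem.Dict.empty)]
  exact delete_nth_loop_eq int arr [] PySem.Dict.empty
    (fun x => by simp [PySem.Dict.getD_empty])
    (fun x => by simp [PySem.Dict.getD_empty])

-- ===== VERDICT (by name: the statement is the Claim_ definition above) =====
theorem delete_nth_spec : Claim_equal_delete_nth := by
  intro arr int _
  unfold Spec_delete_nth
  rw [A_eq_runC]
  by_cases hp : int ≤ 0
  · rw [runC_nonpos int hp arr]
    simp [delete_nth_alt, hp]
  · have hp' : 0 < int := by omega
    rw [alt_eq arr int hp',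
        PySem.List.sorted_eq_of_perm_of_pairwise_lt _ _ _
          (flat_perm_good int hp' arr).symm (good_pairwise_lt int arr),
        map_good_runC int hp' arr]
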